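-- pv_equiv track=rewrite | github.com/shiksb/IntroPython | homework/HW2/solutions/cross_sort.py | cross_sort
-- ===== SOURCE A (Python) =====
-- def cross_sort(L):
--     """
--     Write a python function crossSort that takes an unsorted list of integers L and returns a new list that fulfills the following requirements:
--     - Even-indexed elements (index 0,2,4…) are sorted in ascending order
--     - Odd-indexed elements (index 1,3,5…) are sorted in descending order
--
--     Note that the input list L should NOT be changed.
--
--     @type L: list
--     @param L: A list of integers
--
--     @rtype: list
--     @return: A new list named sorted_list that fulfills the above requirements
--
--     """
--     # write your code here
--
--     # collect every other element, sort appropriately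
--     even_sorted = sorted(L[::2])
--     odd_sorted = sorted(L[1::2])
--     odd_sorted.reverse()
--     sorted_list = []
--
--     for i in range(len(L)):
--         # take turns adding items from evens sorted and odds sorted to the
--         # new sorted_list array
--         if i % 2 == 0:
--             sorted_list.append(even_sorted[i//2])
--         else:
--             sorted_list.append(odd_sorted[i//2])
--
--     return sorted_list
-- ===== SOURCE B (Python) =====
-- def cross_sort(L):
--     # Decorate-sort-undecorate with ONE global sort: tag each element with its
--     # index parity (negating odd-position values so ascending order means
--     # descending for them), sort the tagged list once, split it, and
--     # re-interleave with zip.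
--     keyed = sorted((i & 1, -x if i & 1 else x) for i, x in enumerate(L))
--     h = (len(L) + 1) // 2
--     ev = [v for _, v in keyed[:h]]
--     od = [-v for _, v in keyed[h:]]
--     out = []
--     for a, b in zip(ev, od):
--         out.append(a)
--         out.append(b)
--     if len(L) % 2:
--         out.append(ev[-1])
--     return out
-- ===== Notes on version B (the rewrite author's own statement) =====
-- stated objective: alternative
-- what changed: Replaces A's two separate slice sorts plus an index-arithmetic merge loop by a single decorate-sort-undecorate pass: each element is tagged (index parity, value negated at odd positions), the tagged list is sorted ONCE lexicographically, then split and re-interleaved with zip.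
import Mathlib
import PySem

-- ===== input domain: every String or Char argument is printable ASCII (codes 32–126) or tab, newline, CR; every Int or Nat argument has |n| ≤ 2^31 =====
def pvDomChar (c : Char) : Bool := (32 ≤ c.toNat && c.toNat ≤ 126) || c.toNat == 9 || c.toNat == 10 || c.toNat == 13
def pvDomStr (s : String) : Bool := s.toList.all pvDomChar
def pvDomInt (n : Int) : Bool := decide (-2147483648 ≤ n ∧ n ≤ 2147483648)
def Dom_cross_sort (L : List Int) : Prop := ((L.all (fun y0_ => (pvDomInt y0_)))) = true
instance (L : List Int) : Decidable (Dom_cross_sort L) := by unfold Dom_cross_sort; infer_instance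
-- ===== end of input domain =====

-- B replaces A's two slice sorts + index-merge loop by a single decorate-sort-undecorate pass
-- (tag each element with its index parity, negating odd-position values; sort once; split; zip);
-- objective: alternative. Neither version mutates L.

-- ===== PORT A =====
def cross_sort (L : List Int) : List Int :=
  -- even_sorted = sorted(L[::2]); odd_sorted = sorted(L[1::2]); odd_sorted.reverse()
  let even_sorted := PySem.List.sorted ((PySem.List.slice? L none none 2).getD []) (fun x => x)
  let odd_sorted := (PySem.List.sorted ((PySem.List.slice? L (some 1) none 2).getD []) (fun x => x)).reverse
  -- for i in range(len(L)): append even_sorted[i//2] (even i) or odd_sorted[i//2] (odd i)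
  (PySem.List.pyRange 0 (L.length : Int) 1).foldl
    (fun sorted_list i =>
      if PySem.Int.mod i 2 = 0 then
        sorted_list ++ [PySem.List.pyGetD even_sorted (PySem.Int.floordiv i 2) 0]
      else
        sorted_list ++ [PySem.List.pyGetD odd_sorted (PySem.Int.floordiv i 2) 0])
    []

-- ===== PORT B =====
def cross_sort_alt (L : List Int) : List Int :=
  -- keyed = sorted((i & 1, -x if i & 1 else x) for i, x in enumerate(L))
  let keyed := PySem.List.sorted2
    ((PySem.List.enumerate L 0).map
      (fun p => (PySem.Int.band p.1 1, if PySem.Int.band p.1 1 ≠ 0 then -p.2 else p.2)))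
    (fun p => p.1) (fun p => p.2)
  -- h = (len(L) + 1) // 2
  let h := PySem.Int.floordiv ((L.length : Int) + 1) 2
  -- ev = [v for _, v in keyed[:h]]; od = [-v for _, v in keyed[h:]]
  let ev := (PySem.List.slice keyed none (some h)).map (fun p => p.2)
  let od := (PySem.List.slice keyed (some h) none).map (fun p => -p.2)
  -- for a, b in zip(ev, od): out.append(a); out.append(b)
  let out := (ev.zip od).foldl (fun acc p => acc ++ [p.1, p.2]) []
  -- if len(L) % 2: out.append(ev[-1])
  if PySem.Int.mod (L.length : Int) 2 ≠ 0 then out ++ [PySem.List.pyGetD ev (-1) 0] else out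

-- ===== PRECONDITION & SPEC =====
def Spec_cross_sort (L : List Int) (out : List Int) : Prop := out = cross_sort_alt L
instance (L : List Int) (out : List Int) : Decidable (Spec_cross_sort L out) := by unfold Spec_cross_sort; infer_instance

-- ===== CLAIM (what is proved, stated in full; the proofs are below) =====
def Claim_equal_cross_sort : Prop := ∀ (L : List Int), Dom_cross_sort L → Spec_cross_sort L (cross_sort L)

-- ===== LEMMAS AND PROOFS =====

-- the even- and odd-indexed sublists, structurally
def pvEvens : List Int → List Int
  | [] => []
  | [a] => [a]
  | a :: _ :: rest => a :: pvEvens rest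

def pvOdds : List Int → List Int
  | [] => []
  | _ :: rest => pvEvens rest

-- interleaving two lists, first list first (stops when the list whose turn it is runs out)
def pvItl : List Int → List Int → List Int
  | [], _ => []
  | e :: es, os => e :: pvItl os es
  termination_by es os => es.length + os.length
  decreasing_by simp; omega

theorem pvEvens_length (L : List Int) : (pvEvens L).length = (L.length + 1) / 2 := by
  induction L using pvEvens.induct with
  | case1 => simp [pvEvens]
  | case2 a => simp [pvEvens]
  | case3 a b rest ih => simp only [pvEvens, List.length_cons, ih]; omega

theorem pvOdds_length (L : List Int) : (pvOdds L).length = L.length / 2 := by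
  cases L with
  | nil => simp [pvOdds]
  | cons a rest => simp only [pvOdds, pvEvens_length, List.length_cons]

theorem pvOdds_cons_cons (a b : Int) (rest : List Int) :
    pvOdds (a :: b :: rest) = b :: pvOdds rest := by
  cases rest <;> rfl

theorem filterMap_evens (L : List Int) :
    List.filterMap (fun k => L[2 * k]?) (List.range ((L.length + 1) / 2)) = pvEvens L := by
  induction L using pvEvens.induct with
  | case1 => simp [pvEvens]
  | case2 a => simp [pvEvens]
  | case3 a b rest ih =>
      have hlen : ((a :: b :: rest).length + 1) / 2 = ((rest.length + 1) / 2) + 1 := by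
        simp; omega
      rw [hlen, List.range_succ_eq_map, List.filterMap_cons, List.filterMap_map]
      simp only [Nat.mul_zero, List.getElem?_cons_zero]
      have : (fun k => (a :: b :: rest)[2 * k]?) ∘ Nat.succ = fun k => rest[2 * k]? := by
        funext k
        have h2 : 2 * Nat.succ k = (2 * k + 1) + 1 := by omega
        simp [h2]
      rw [this, ih, pvEvens]

theorem slice_evens (L : List Int) : PySem.List.slice? L none none 2 = some (pvEvens L) := by
  rw [PySem.List.slice?, PySem.List.sliceIndices]
  simp only [if_neg (by norm_num : ¬ (2 : Int) = 0)]
  norm_num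
  have hc : (if 0 < L.length then (((L.length : Int) + 2 - 1) / 2).toNat else 0) = (L.length + 1) / 2 := by
    split_ifs <;> omega
  rw [hc]
  have hf : (fun k : Nat => L[((2 : Int) * ↑k).toNat]?) = fun k : Nat => L[2 * k]? := by
    funext k
    have h2 : ((2 : Int) * (k : Int)).toNat = 2 * k := by omega
    rw [h2]
  rw [hf, filterMap_evens]

theorem slice_odds (L : List Int) : PySem.List.slice? L (some 1) none 2 = some (pvOdds L) := by
  rw [PySem.List.slice?, PySem.List.sliceIndices]
  simp only [if_neg (by norm_num : ¬ (2 : Int) = 0)]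
  norm_num
  cases L with
  | nil => simp [pvOdds]
  | cons a rest =>
      have hmin : min (1 : Int) ((a :: rest).length : Int) = 1 := by
        simp only [List.length_cons]; omega
      rw [hmin]
      have hc : (if 1 < (a :: rest).length then ((((a :: rest).length : Int) - 1 + 2 - 1) / 2).toNat else 0)
          = (rest.length + 1) / 2 := by
        simp only [List.length_cons]; split_ifs <;> omega
      rw [hc]
      have hf : (fun k : Nat => (a :: rest)[((1 : Int) + 2 * ↑k).toNat]?) = fun k : Nat => rest[2 * k]? := by
        funext k
        have h2 : ((1 : Int) + 2 * (k : Int)).toNat = 2 * k + 1 := by omega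
        simp [h2]
      rw [hf, filterMap_evens, pvOdds]

-- reversing Python's ascending sort is exactly its reverse=True sort (identity key on Int)
theorem sorted_reverse_eq_sorted_rev (xs : List Int) :
    (PySem.List.sorted xs (fun x => x)).reverse = PySem.List.sorted xs (fun x => x) true := by
  apply List.Perm.eq_of_pairwise (le := fun a b : Int => b ≤ a)
  · intro a b _ _ h1 h2; omega
  · exact List.pairwise_reverse.mpr (PySem.List.sorted_pairwise xs (fun x => x))
  · exact PySem.List.sorted_pairwise_rev xs (fun x => x)
  · exact ((List.reverse_perm _).trans (PySem.List.sorted_perm xs (fun x => x) false)).trans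
      (PySem.List.sorted_perm xs (fun x => x) true).symm

-- A's merge loop, reduced to a map over range, is the interleaving of the two sorted lists
theorem map_range_eq_itl (es os : List Int) (n : Nat)
    (hes : es.length = (n + 1) / 2) (hos : os.length = n / 2) :
    (List.range n).map (fun k => if k % 2 = 0 then es.getD (k / 2) 0 else os.getD (k / 2) 0)
      = pvItl es os := by
  induction es, os using pvItl.induct generalizing n with
  | case1 os =>
      have : n = 0 := by simp at hes; omega
      subst this; simp [pvItl]
  | case2 e es₂ os ih =>
      obtain ⟨m, rfl⟩ : ∃ m, n = m + 1 := ⟨n - 1, by simp at hes; omega⟩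
      rw [List.range_succ_eq_map, List.map_cons, List.map_map]
      have hfun : ((fun k => if k % 2 = 0 then (e :: es₂).getD (k / 2) 0 else os.getD (k / 2) 0) ∘ Nat.succ)
          = fun k => if k % 2 = 0 then os.getD (k / 2) 0 else es₂.getD (k / 2) 0 := by
        funext k
        rcases Nat.even_or_odd k with hk | hk
        · obtain ⟨j, rfl⟩ := hk
          have h0 : (j + j) % 2 = 0 := by omega
          have h1 : ¬ Nat.succ (j + j) % 2 = 0 := by omega
          have h2 : Nat.succ (j + j) / 2 = (j + j) / 2 := by omega
          simp [Function.comp, h0, h1, h2]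
        · obtain ⟨j, rfl⟩ := hk
          have h1 : Nat.succ (2 * j + 1) % 2 = 0 := by omega
          have h2 : Nat.succ (2 * j + 1) / 2 = j + 1 := by omega
          have h3 : ¬ (2 * j + 1) % 2 = 0 := by omega
          have h4 : (2 * j + 1) / 2 = j := by omega
          simp [Function.comp, h1, h2, h4]
      have hhead : (if 0 % 2 = 0 then (e :: es₂).getD (0 / 2) 0 else os.getD (0 / 2) 0) = e := by
        simp
      rw [hfun, hhead, ih m (by simp at hes ⊢; omega) (by simp at hes; omega)]
      simp [pvItl]

-- B's tuple sort: sorted2 with the two projections is Python's lexicographic sort = sorted with key toLex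
theorem sorted2_eq_sorted_toLex (xs : List (Int × Int)) :
    PySem.List.sorted2 xs (fun p => p.1) (fun p => p.2)
      = PySem.List.sorted xs (fun p => toLex p) := by
  simp only [PySem.List.sorted2, PySem.List.sorted]
  have hb : (fun (a b : Int × Int) =>
        decide (a.1 < b.1) || (!decide (b.1 < a.1) && decide (a.2 < b.2)))
      = fun (a b : Int × Int) => decide (toLex a < toLex b) := by
    funext a b
    rw [Bool.eq_iff_iff]
    simp only [Bool.or_eq_true, Bool.and_eq_true, Bool.not_eq_true', decide_eq_true_eq,
      decide_eq_false_iff_not, Prod.Lex.lt_iff, ofLex_toLex]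
    omega
  simp only [if_neg (by decide : ¬ (false = true)), hb]

-- the decorated list is a permutation of the tagged evens followed by the tagged (negated) odds
theorem keyed_perm (L : List Int) (s : Int) (h0 : PySem.Int.band s 1 = 0) :
    ((PySem.List.enumerate L s).map
        (fun p => (PySem.Int.band p.1 1, if PySem.Int.band p.1 1 ≠ 0 then -p.2 else p.2))).Perm
      ((pvEvens L).map (fun x => ((0 : Int), x)) ++ (pvOdds L).map (fun x => ((1 : Int), -x))) := by
  induction L using pvEvens.induct generalizing s with
  | case1 => simp [PySem.List.enumerate_nil, pvEvens, pvOdds]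
  | case2 a =>
      simp [PySem.List.enumerate_cons, PySem.List.enumerate_nil, pvEvens, pvOdds, h0]
  | case3 a b rest ih =>
      have e0 : s % 2 = 0 := by
        rw [PySem.Int.band_one, PySem.Int.mod_eq_emod_of_pos (by omega)] at h0; exact h0
      have h1 : PySem.Int.band (s + 1) 1 = 1 := by
        rw [PySem.Int.band_one, PySem.Int.mod_eq_emod_of_pos (by omega)]; omega
      have h2 : PySem.Int.band (s + 1 + 1) 1 = 0 := by
        rw [PySem.Int.band_one, PySem.Int.mod_eq_emod_of_pos (by omega)]; omega
      rw [PySem.List.enumerate_cons, PySem.List.enumerate_cons]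
      simp only [List.map_cons, h0, h1,
        if_neg (show ¬ ((0 : Int) ≠ 0) by norm_num), if_pos (show ((1 : Int) ≠ 0) by norm_num)]
      rw [show pvEvens (a :: b :: rest) = a :: pvEvens rest from rfl, pvOdds_cons_cons]
      simp only [List.map_cons, List.cons_append]
      refine List.Perm.cons _ ?_
      exact (List.Perm.cons _ (ih (s + 1 + 1) h2)).trans List.perm_middle.symm

-- sorting the decorated list lexicographically = sorted tagged evens ++ sorted tagged negated odds
theorem sorted_keyed_eq (L : List Int) :
    PySem.List.sorted
        ((PySem.List.enumerate L 0).map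
          (fun p => (PySem.Int.band p.1 1, if PySem.Int.band p.1 1 ≠ 0 then -p.2 else p.2)))
        (fun p => toLex p)
      = (PySem.List.sorted (pvEvens L) (fun x => x)).map (fun x => ((0 : Int), x))
        ++ (PySem.List.sorted ((pvOdds L).map (fun x => -x)) (fun x => x)).map
            (fun x => ((1 : Int), x)) := by
  apply PySem.List.eq_of_perm_of_pairwise_le_of_injective (fun p : Int × Int => toLex p)
      (Equiv.injective toLex)
  · -- permutation
    refine ((PySem.List.sorted_perm _ _ false).trans ?_)
    refine (keyed_perm L 0 (by decide)).trans ?_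
    refine List.Perm.append ?_ ?_
    · exact ((PySem.List.sorted_perm (pvEvens L) (fun x => x) false).map _).symm
    · have : (pvOdds L).map (fun x => ((1 : Int), -x))
          = ((pvOdds L).map (fun x => -x)).map (fun x => ((1 : Int), x)) := by
        rw [List.map_map]; rfl
      rw [this]
      exact ((PySem.List.sorted_perm ((pvOdds L).map (fun x => -x)) (fun x => x) false).map _).symm
  · exact PySem.List.sorted_pairwise _ _
  · -- pairwise of the right-hand side
    rw [List.pairwise_append]
    refine ⟨?_, ?_, ?_⟩
    · rw [List.pairwise_map]
      refine (PySem.List.sorted_pairwise (pvEvens L) (fun x => x)).imp ?_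
      intro a b hab
      show toLex ((0 : Int), a) ≤ toLex ((0 : Int), b)
      rw [Prod.Lex.le_iff]; right; exact ⟨rfl, hab⟩
    · rw [List.pairwise_map]
      refine (PySem.List.sorted_pairwise ((pvOdds L).map (fun x => -x)) (fun x => x)).imp ?_
      intro a b hab
      show toLex ((1 : Int), a) ≤ toLex ((1 : Int), b)
      rw [Prod.Lex.le_iff]; right; exact ⟨rfl, hab⟩
    · intro a ha b hb
      simp only [List.mem_map] at ha hb
      obtain ⟨x, _, rfl⟩ := ha
      obtain ⟨y, _, rfl⟩ := hb
      show toLex ((0 : Int), x) ≤ toLex ((1 : Int), y)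
      rw [Prod.Lex.le_iff]; left; norm_num

-- un-negating the ascending sort of the negated odds is exactly the reverse=True sort
theorem map_neg_sorted_neg (xs : List Int) :
    (PySem.List.sorted (xs.map (fun x => -x)) (fun x => x)).map (fun x => -x)
      = PySem.List.sorted xs (fun x => x) true := by
  apply PySem.List.eq_of_perm_of_pairwise_le_of_injective (fun x : Int => -x)
      neg_injective
  · refine ((PySem.List.sorted_perm (xs.map (fun x => -x)) (fun x => x) false).map _).trans ?_
    rw [List.map_map]
    refine (List.Perm.of_eq ?_).trans (PySem.List.sorted_perm xs (fun x => x) true).symm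
    have : ((fun x : Int => -x) ∘ fun x : Int => -x) = id := by funext x; simp
    rw [this, List.map_id]
  · rw [List.pairwise_map]
    refine (PySem.List.sorted_pairwise (xs.map (fun x => -x)) (fun x => x)).imp ?_
    intro a b hab; simp only [] at hab ⊢; omega
  · refine (PySem.List.sorted_pairwise_rev xs (fun x => x)).imp ?_
    intro a b hab; simp only [] at hab ⊢; omega

-- B's zip loop, even case: equal lengths interleave completely
theorem zip_itl_even (es os : List Int) (h : es.length = os.length) :
    (es.zip os).flatMap (fun p => [p.1, p.2]) = pvItl es os := by
  induction es generalizing os with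
  | nil =>
      have : os = [] := List.length_eq_zero_iff.mp (by simp at h; omega)
      subst this; simp [pvItl]
  | cons e es' ih =>
      cases os with
      | nil => simp at h
      | cons o os' =>
          rw [List.zip_cons_cons, List.flatMap_cons, ih os' (by simp at h; omega),
              show pvItl (e :: es') (o :: os') = e :: pvItl (o :: os') es' by rw [pvItl],
              show pvItl (o :: os') es' = o :: pvItl es' os' by rw [pvItl]]
          rfl

-- B's zip loop, odd case: one leftover even element, appended at the end
theorem zip_itl_odd (es os : List Int) (h : es.length = os.length + 1) (hne : es ≠ []) :
    (es.zip os).flatMap (fun p => [p.1, p.2]) ++ [es.getLast hne] = pvItl es os := by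
  induction es generalizing os with
  | nil => simp at h
  | cons e es' ih =>
      cases os with
      | nil =>
          have : es' = [] := by
            simp only [List.length_cons, List.length_nil] at h
            exact List.length_eq_zero_iff.mp (by omega)
          subst this; simp [pvItl]
      | cons o os' =>
          have hne' : es' ≠ [] := by
            intro hc; subst hc; simp at h
          have hlast : (e :: es').getLast hne = es'.getLast hne' := List.getLast_cons hne'
          rw [List.zip_cons_cons, List.flatMap_cons, hlast,
              show pvItl (e :: es') (o :: os') = e :: pvItl (o :: os') es' by rw [pvItl],
              show pvItl (o :: os') es' = o :: pvItl es' os' by rw [pvItl],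
              ← ih os' (by simp only [List.length_cons] at h; omega) hne']
          simp

-- ===== VERDICT (by name: the statement is the Claim_ definition above) =====
theorem cross_sort_spec : Claim_equal_cross_sort := by
  intro L _
  unfold Spec_cross_sort cross_sort cross_sort_alt
  rw [slice_evens, slice_odds]
  simp only [Option.getD_some]
  set n := L.length with hn
  set es := PySem.List.sorted (pvEvens L) (fun x => x) with hes_def
  set osB := PySem.List.sorted (pvOdds L) (fun x => x) true with hosB_def
  have hlen_es : es.length = (n + 1) / 2 := by
    rw [hes_def, PySem.List.length_sorted, pvEvens_length]
  have hlen_osB : osB.length = n / 2 := by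
    rw [hosB_def, PySem.List.length_sorted, pvOdds_length]
  -- ===== A side: the append loop is pvItl es (reverse of ascending sort) =====
  have hA : (PySem.List.pyRange 0 (n : Int) 1).foldl
      (fun sorted_list i =>
        if PySem.Int.mod i 2 = 0 then sorted_list ++ [PySem.List.pyGetD es (PySem.Int.floordiv i 2) 0]
        else sorted_list ++ [PySem.List.pyGetD ((PySem.List.sorted (pvOdds L) (fun x => x)).reverse) (PySem.Int.floordiv i 2) 0])
      [] = pvItl es osB := by
    set osA := (PySem.List.sorted (pvOdds L) (fun x => x)).reverse with hosA_def
    have hAB : osA = osB := sorted_reverse_eq_sorted_rev (pvOdds L)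
    have hlen_os : osA.length = n / 2 := by rw [hAB]; exact hlen_osB
    have hfold : (fun (sorted_list : List Int) i =>
          if PySem.Int.mod i 2 = 0 then sorted_list ++ [PySem.List.pyGetD es (PySem.Int.floordiv i 2) 0]
          else sorted_list ++ [PySem.List.pyGetD osA (PySem.Int.floordiv i 2) 0])
        = fun (sorted_list : List Int) i => sorted_list ++
            [if PySem.Int.mod i 2 = 0 then PySem.List.pyGetD es (PySem.Int.floordiv i 2) 0
             else PySem.List.pyGetD osA (PySem.Int.floordiv i 2) 0] := by
      funext s i; split_ifs <;> rfl
    rw [hfold, PySem.List.foldl_append_singleton_eq_map, PySem.List.pyRange_zero_nat, List.map_map]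
    have hmap : ((fun i => if PySem.Int.mod i 2 = 0 then PySem.List.pyGetD es (PySem.Int.floordiv i 2) 0
            else PySem.List.pyGetD osA (PySem.Int.floordiv i 2) 0) ∘ fun k : Nat => (k : Int))
        = fun k : Nat => if k % 2 = 0 then es.getD (k / 2) 0 else osA.getD (k / 2) 0 := by
      funext k
      have hm : PySem.Int.mod (k : Int) 2 = ((k % 2 : Nat) : Int) := by
        rw [PySem.Int.mod_eq_emod_of_pos (by omega)]; push_cast; omega
      have hd : PySem.Int.floordiv (k : Int) 2 = ((k / 2 : Nat) : Int) := by
        rw [PySem.Int.floordiv_eq_ediv_of_pos (by omega)]; push_cast; omega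
      simp only [Function.comp_apply]
      rw [hm, hd, PySem.List.pyGetD_natCast, PySem.List.pyGetD_natCast]
      by_cases h : k % 2 = 0
      · rw [if_pos (show ((k % 2 : Nat) : Int) = 0 by exact_mod_cast h), if_pos h]
      · rw [if_neg (show ¬ ((k % 2 : Nat) : Int) = 0 by exact_mod_cast h), if_neg h]
    rw [hmap, map_range_eq_itl es osA n hlen_es hlen_os, hAB]
    simp
  rw [hA]
  -- ===== B side =====
  rw [sorted2_eq_sorted_toLex, sorted_keyed_eq]
  set os'' := PySem.List.sorted ((pvOdds L).map (fun x => -x)) (fun x => x) with hospp_def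
  have hlen_mapE : ((es.map (fun x => ((0 : Int), x))).length) = (n + 1) / 2 := by
    rw [List.length_map, hlen_es]
  -- the slice bound h is the length of the tagged evens block
  have hh : PySem.Int.floordiv ((n : Int) + 1) 2 = (((n + 1) / 2 : Nat) : Int) := by
    rw [PySem.Int.floordiv_eq_ediv_of_pos (by omega)]; push_cast; omega
  rw [hh, PySem.List.slice_to_natCast, PySem.List.slice_from_natCast,
      List.take_left' hlen_mapE, List.drop_left' hlen_mapE, List.map_map, List.map_map]
  have hev : (es.map (fun x => ((0 : Int), x))).map (fun p : Int × Int => p.2) = es := by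
    rw [List.map_map]; simp
  have hod : (os''.map (fun x => ((1 : Int), x))).map (fun p : Int × Int => -p.2)
      = PySem.List.sorted (pvOdds L) (fun x => x) true := by
    rw [List.map_map]
    have : ((fun p : Int × Int => -p.2) ∘ fun x : Int => ((1 : Int), x)) = fun x : Int => -x := rfl
    rw [this, hospp_def, map_neg_sorted_neg]
  rw [show ((fun p : Int × Int => p.2) ∘ fun x : Int => ((0 : Int), x)) = fun x : Int => x from rfl,
      show ((fun p : Int × Int => -p.2) ∘ fun x : Int => ((1 : Int), x)) = fun x : Int => -x from rfl]
  have hod' : os''.map (fun x : Int => -x) = osB := by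
    rw [hospp_def, map_neg_sorted_neg, hosB_def]
  rw [List.map_id', hod']
  rw [PySem.List.foldl_append_eq_flatMap]
  have hflat : (es.zip osB).flatMap (fun p : Int × Int => [p.1, p.2])
      = [] ++ (es.zip osB).flatMap (fun p : Int × Int => [p.1, p.2]) := by simp
  by_cases hpar : n % 2 = 0
  · -- even length: no leftover element
    have hmod : ¬ PySem.Int.mod (n : Int) 2 ≠ 0 := by
      rw [PySem.Int.mod_eq_emod_of_pos (by omega)]; omega
    rw [if_neg hmod, List.nil_append]
    exact (zip_itl_even es osB (by omega)).symm
  · -- odd length: one trailing even element, ev[-1]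
    have hmod : PySem.Int.mod (n : Int) 2 ≠ 0 := by
      rw [PySem.Int.mod_eq_emod_of_pos (by omega)]; omega
    have hne : es ≠ [] := by
      intro hc
      rw [hc] at hlen_es; simp at hlen_es; omega
    rw [if_pos hmod, List.nil_append, PySem.List.pyGetD_neg_one es 0 hne]
    exact (zip_itl_odd es osB (by omega) hne).symm
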